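-- pv_equiv track=rewrite | github.com/nlvegan/verenigingen | verenigingen/e_boekhouden/doctype/e_boekhouden_settings/e_boekhouden_settings.py | should_suggest_cost_center
-- ===== SOURCE A (Python) =====
-- def should_suggest_cost_center(code, name):
--     """Determine if an account group should become a cost center"""
--     name_lower = name.lower()
--
--     # Expense groups are prime candidates
--     if code.startswith(("5", "6")):  # Personnel costs, other expenses
--         if any(keyword in name_lower for keyword in ["personeel", "salaris", "kosten", "uitgaven"]):
--             return True, "Expense group - good for cost tracking"
--
--     # Revenue groups for departmental analysis
--     if code.startswith("3"):  # Revenue accounts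
--         if any(keyword in name_lower for keyword in ["opbrengst", "omzet", "verkoop"]):
--             return True, "Revenue group - useful for departmental income tracking"
--
--     # Specific departmental or operational indicators
--     operational_keywords = [
--         "afdeling",
--         "departement",
--         "team",
--         "project",
--         "activiteit",
--         "programma",
--         "campagne",
--         "dienst",
--         "sector",
--     ]
--     if any(keyword in name_lower for keyword in operational_keywords):
--         return True, "Contains departmental/operational keywords"
--
--     # Cost-related groups
--     cost_keywords = ["kosten", "uitgaven", "lasten", "onkosten"]
--     if any(keyword in name_lower for keyword in cost_keywords):
--         return True, "Cost-related group"
--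
--     # Skip balance sheet items that don't need cost tracking
--     if code.startswith(("1", "2")):  # Assets, Liabilities
--         balance_keywords = ["activa", "passiva", "schuld", "vordering", "bank", "kas"]
--         if any(keyword in name_lower for keyword in balance_keywords):
--             return False, "Balance sheet item - cost center not needed"
--
--     return False, "Not suitable for cost center tracking"
-- ===== SOURCE B (Python) =====
-- _KEYWORD_TAGS = [
--     ("personeel", ["E"]), ("salaris", ["E"]),
--     ("kosten", ["E", "C"]), ("uitgaven", ["E", "C"]),
--     ("opbrengst", ["R"]), ("omzet", ["R"]), ("verkoop", ["R"]),
--     ("afdeling", ["O"]), ("departement", ["O"]), ("team", ["O"]),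
--     ("project", ["O"]), ("activiteit", ["O"]), ("programma", ["O"]),
--     ("campagne", ["O"]), ("dienst", ["O"]), ("sector", ["O"]),
--     ("lasten", ["C"]), ("onkosten", ["C"]),
--     ("activa", ["B"]), ("passiva", ["B"]), ("schuld", ["B"]),
--     ("vordering", ["B"]), ("bank", ["B"]), ("kas", ["B"]),
-- ]
--
--
-- def should_suggest_cost_center(code, name):
--     lowered = name.lower()
--     # Stage 1: classify the name once into a set of category tags.
--     hits = set()
--     for keyword, tags in _KEYWORD_TAGS:
--         if keyword in lowered:
--             hits.update(tags)
--     # Stage 2: pure decision over the tag set and the account-code prefix.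
--     if "E" in hits and code.startswith(("5", "6")):
--         return True, "Expense group - good for cost tracking"
--     if "R" in hits and code.startswith("3"):
--         return True, "Revenue group - useful for departmental income tracking"
--     if "O" in hits:
--         return True, "Contains departmental/operational keywords"
--     if "C" in hits:
--         return True, "Cost-related group"
--     if "B" in hits and code.startswith(("1", "2")):
--         return False, "Balance sheet item - cost center not needed"
--     return False, "Not suitable for cost center tracking"
-- ===== Notes on version B (the rewrite author's own statement) =====
-- stated objective: alternative
-- what changed: B is a two-stage classifier: one pass over a flat keyword-to-tag map classifies the lowered name into a set of category tags, then a separate pure decision combines that tag set with the code prefix - instead of A's interleaved per-branch keyword scans with early returns.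
import Mathlib
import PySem

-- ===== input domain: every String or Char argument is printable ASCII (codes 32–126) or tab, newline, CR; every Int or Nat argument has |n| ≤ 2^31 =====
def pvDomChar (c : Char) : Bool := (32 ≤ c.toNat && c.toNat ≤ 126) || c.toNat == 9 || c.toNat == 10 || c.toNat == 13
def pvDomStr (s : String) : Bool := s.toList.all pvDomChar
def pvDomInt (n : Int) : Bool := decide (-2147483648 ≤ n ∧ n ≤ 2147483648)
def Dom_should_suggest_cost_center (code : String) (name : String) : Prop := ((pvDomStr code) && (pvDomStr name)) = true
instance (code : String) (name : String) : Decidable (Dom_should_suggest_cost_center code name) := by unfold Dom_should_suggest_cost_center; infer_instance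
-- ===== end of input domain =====

-- B restructures A's interleaved per-branch keyword scans into a two-stage classifier: one pass
-- over a flat keyword→tag map collects a tag set from the name, then a pure decision combines
-- that set with the code prefix (alternative decomposition, same cost).

-- ===== PORT A =====
def should_suggest_cost_center (code : String) (name : String) : Bool × String :=
  let name_lower := PySem.Str.lower name
  if (PySem.Str.startswith code "5" || PySem.Str.startswith code "6") &&
     (["personeel", "salaris", "kosten", "uitgaven"].any (fun kw => PySem.Str.isIn kw name_lower)) then
    (true, "Expense group - good for cost tracking")
  else if PySem.Str.startswith code "3" &&
     (["opbrengst", "omzet", "verkoop"].any (fun kw => PySem.Str.isIn kw name_lower)) then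
    (true, "Revenue group - useful for departmental income tracking")
  else if ["afdeling", "departement", "team", "project", "activiteit", "programma", "campagne",
           "dienst", "sector"].any (fun kw => PySem.Str.isIn kw name_lower) then
    (true, "Contains departmental/operational keywords")
  else if ["kosten", "uitgaven", "lasten", "onkosten"].any (fun kw => PySem.Str.isIn kw name_lower) then
    (true, "Cost-related group")
  else if (PySem.Str.startswith code "1" || PySem.Str.startswith code "2") &&
     (["activa", "passiva", "schuld", "vordering", "bank", "kas"].any (fun kw => PySem.Str.isIn kw name_lower)) then
    (false, "Balance sheet item - cost center not needed")
  else
    (false, "Not suitable for cost center tracking")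

-- ===== PORT B =====
def pvKeywordTags : List (String × List String) :=
  [ ("personeel", ["E"]), ("salaris", ["E"]),
    ("kosten", ["E", "C"]), ("uitgaven", ["E", "C"]),
    ("opbrengst", ["R"]), ("omzet", ["R"]), ("verkoop", ["R"]),
    ("afdeling", ["O"]), ("departement", ["O"]), ("team", ["O"]),
    ("project", ["O"]), ("activiteit", ["O"]), ("programma", ["O"]),
    ("campagne", ["O"]), ("dienst", ["O"]), ("sector", ["O"]),
    ("lasten", ["C"]), ("onkosten", ["C"]),
    ("activa", ["B"]), ("passiva", ["B"]), ("schuld", ["B"]),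
    ("vordering", ["B"]), ("bank", ["B"]), ("kas", ["B"]) ]

-- stage 1 of Source B: the tag set collected from the lowered name
def pvHits (lowered : String) : PySem.Set String :=
  pvKeywordTags.foldl
    (fun s p => if PySem.Str.isIn p.1 lowered then PySem.Set.update s p.2 else s)
    PySem.Set.empty

def should_suggest_cost_center_alt (code : String) (name : String) : Bool × String :=
  let lowered := PySem.Str.lower name
  let hits := pvHits lowered
  if PySem.Set.contains hits "E" &&
     (PySem.Str.startswith code "5" || PySem.Str.startswith code "6") then
    (true, "Expense group - good for cost tracking")
  else if PySem.Set.contains hits "R" && PySem.Str.startswith code "3" then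
    (true, "Revenue group - useful for departmental income tracking")
  else if PySem.Set.contains hits "O" then
    (true, "Contains departmental/operational keywords")
  else if PySem.Set.contains hits "C" then
    (true, "Cost-related group")
  else if PySem.Set.contains hits "B" &&
     (PySem.Str.startswith code "1" || PySem.Str.startswith code "2") then
    (false, "Balance sheet item - cost center not needed")
  else
    (false, "Not suitable for cost center tracking")

-- ===== PRECONDITION & SPEC =====
def Spec_should_suggest_cost_center (code : String) (name : String) (out : Bool × String) : Prop := out = should_suggest_cost_center_alt code name
instance (code : String) (name : String) (out : Bool × String) : Decidable (Spec_should_suggest_cost_center code name out) := by unfold Spec_should_suggest_cost_center; infer_instance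

-- ===== CLAIM (what is proved, stated in full; the proofs are below) =====
def Claim_equal_should_suggest_cost_center : Prop := ∀ (code : String) (name : String), Dom_should_suggest_cost_center code name → Spec_should_suggest_cost_center code name (should_suggest_cost_center code name)

-- ===== LEMMAS AND PROOFS =====

-- membership in the tag set accumulated by stage 1's fold, as a Boolean disjunction over the map
theorem contains_tag_fold (lowered : String) (t : String)
    (l : List (String × List String)) (s0 : PySem.Set String) :
    PySem.Set.contains
      (l.foldl (fun s p => if PySem.Str.isIn p.1 lowered then PySem.Set.update s p.2 else s) s0) t
    = (PySem.Set.contains s0 t ||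
       l.any (fun p => PySem.Str.isIn p.1 lowered && p.2.contains t)) := by
  induction l generalizing s0 with
  | nil => simp
  | cons p l ih =>
    simp only [List.foldl_cons, List.any_cons]
    by_cases h : PySem.Str.isIn p.1 lowered = true
    · rw [if_pos h, ih, h]
      have : PySem.Set.contains (PySem.Set.update s0 p.2) t
          = (PySem.Set.contains s0 t || p.2.contains t) := by
        rw [Bool.eq_iff_iff]
        simp [PySem.Set.mem_update]
      rw [this]
      simp [Bool.or_assoc]
    · rw [if_neg h, ih, Bool.eq_false_iff.mpr h]
      simp

set_option maxHeartbeats 1000000 in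
theorem should_suggest_cost_center_spec : Claim_equal_should_suggest_cost_center := by
  intro code name _
  unfold Spec_should_suggest_cost_center should_suggest_cost_center should_suggest_cost_center_alt pvHits
  simp only [contains_tag_fold, pvKeywordTags, List.any_cons, List.any_nil, List.contains_cons,
    List.contains_nil]
  simp only [beq_self_eq_true, String.reduceBEq, Bool.or_false, Bool.false_or, Bool.and_true,
    Bool.and_false, PySem.Set.empty, PySem.Set.contains,
    List.elem_nil]
  cases h1 : PySem.Str.startswith code "5" || PySem.Str.startswith code "6" <;>
  cases h2 : PySem.Str.startswith code "3" <;>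
  cases h3 : PySem.Str.startswith code "1" || PySem.Str.startswith code "2" <;>
  cases hE : PySem.Str.isIn "personeel" (PySem.Str.lower name) || (PySem.Str.isIn "salaris" (PySem.Str.lower name) || (PySem.Str.isIn "kosten" (PySem.Str.lower name) || PySem.Str.isIn "uitgaven" (PySem.Str.lower name))) <;>
  cases hR : PySem.Str.isIn "opbrengst" (PySem.Str.lower name) || (PySem.Str.isIn "omzet" (PySem.Str.lower name) || PySem.Str.isIn "verkoop" (PySem.Str.lower name)) <;>
  cases hO : PySem.Str.isIn "afdeling" (PySem.Str.lower name) || (PySem.Str.isIn "departement" (PySem.Str.lower name) || (PySem.Str.isIn "team" (PySem.Str.lower name) || (PySem.Str.isIn "project" (PySem.Str.lower name) || (PySem.Str.isIn "activiteit" (PySem.Str.lower name) || (PySem.Str.isIn "programma" (PySem.Str.lower name) || (PySem.Str.isIn "campagne" (PySem.Str.lower name) || (PySem.Str.isIn "dienst" (PySem.Str.lower name) || PySem.Str.isIn "sector" (PySem.Str.lower name)))))))) <;>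
  cases hC : PySem.Str.isIn "kosten" (PySem.Str.lower name) || (PySem.Str.isIn "uitgaven" (PySem.Str.lower name) || (PySem.Str.isIn "lasten" (PySem.Str.lower name) || PySem.Str.isIn "onkosten" (PySem.Str.lower name))) <;>
  cases hB : PySem.Str.isIn "activa" (PySem.Str.lower name) || (PySem.Str.isIn "passiva" (PySem.Str.lower name) || (PySem.Str.isIn "schuld" (PySem.Str.lower name) || (PySem.Str.isIn "vordering" (PySem.Str.lower name) || (PySem.Str.isIn "bank" (PySem.Str.lower name) || PySem.Str.isIn "kas" (PySem.Str.lower name))))) <;>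
  rfl
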